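-- pv_equiv track=rewrite | github.com/djm07048/LCS | modules/gui_sweep.py | group_topics_by_order
-- ===== SOURCE A (Python) =====
-- def group_topics_by_order(topics_data, order_data):
--     """order_data의 value로 그룹화하고 각 그룹 내에서 key 순서대로 정렬"""
--     grouped_topics = {}
--
--     for key, topic_name in topics_data.items():
--         if key in order_data:
--             order_value = order_data[key]
--             if order_value not in grouped_topics:
--                 grouped_topics[order_value] = []
--             grouped_topics[order_value].append(key)
--
--     # 각 그룹 내에서 키 순서대로 정렬 (order_data에 나타나는 순서대로)
--     order_keys = list(order_data.keys())
--     for order_value in grouped_topics: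
--         grouped_topics[order_value].sort(key=lambda x: order_keys.index(x) if x in order_keys else float('inf'))
--
--     return grouped_topics
-- ===== SOURCE B (Python) =====
-- def group_topics_by_order(topics_data, order_data):
--     """order_data의 value로 그룹화하고 각 그룹 내에서 key 순서대로 정렬"""
--     # Pass 1: create the groups (empty) in the same first-encounter order as A.
--     grouped = {}
--     for key in topics_data:
--         if key in order_data:
--             ov = order_data[key]
--             if ov not in grouped:
--                 grouped[ov] = []
--     # Pass 2: walk order_data in its own key order; appending in this order
--     # fills every group already sorted by position in order_data, so no
--     # per-group sort (with its repeated list.index scans) is needed.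
--     for key, ov in order_data.items():
--         if key in topics_data:
--             grouped[ov].append(key)
--     return grouped
-- ===== Notes on version B (the rewrite author's own statement) =====
-- stated objective: faster
-- what changed: Instead of appending keys in topics_data order and then sorting every group with a key function that calls list.index (a linear scan per comparison), B creates the empty groups in one pass over topics_data (fixing the outer key order) and fills them in a second pass over order_data, which yields each group already in order_data-position order with no sort and no index scans.
import Mathlib
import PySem

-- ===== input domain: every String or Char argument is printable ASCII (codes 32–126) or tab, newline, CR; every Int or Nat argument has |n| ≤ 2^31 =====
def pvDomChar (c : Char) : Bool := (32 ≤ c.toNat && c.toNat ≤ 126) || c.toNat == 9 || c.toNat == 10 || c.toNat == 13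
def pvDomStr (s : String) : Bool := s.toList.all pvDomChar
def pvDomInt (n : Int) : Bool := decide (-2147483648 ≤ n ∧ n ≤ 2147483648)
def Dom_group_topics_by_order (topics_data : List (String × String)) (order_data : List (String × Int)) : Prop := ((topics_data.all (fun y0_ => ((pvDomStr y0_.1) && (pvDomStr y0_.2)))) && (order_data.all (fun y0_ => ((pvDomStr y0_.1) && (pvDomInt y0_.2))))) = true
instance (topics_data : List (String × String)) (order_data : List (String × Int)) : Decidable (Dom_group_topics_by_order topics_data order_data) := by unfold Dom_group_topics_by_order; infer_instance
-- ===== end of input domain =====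

-- B replaces A's per-group sort (whose key function rescans order_data's key list with
-- list.index on every call) by a second pass over order_data that fills each group
-- already in order (objective: faster — no sort, no index scans).

-- ===== PORT A =====
-- sort key `order_keys.index(x) if x in order_keys else float('inf')`; the `else` arm is
-- unreachable for grouped keys (they all come from order_data), so any value ≥ every index
-- is an exact stand-in for float('inf'); we use len(order_keys).
def gtboSortKey (order_keys : List String) (x : String) : Int :=
  match PySem.List.index? order_keys x with
  | some i => (i : Int)
  | none => (order_keys.length : Int)

def group_topics_by_order (topics_data : List (String × String)) (order_data : List (String × Int)) : List (Int × List String) :=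
  let od := PySem.Dict.ofList order_data
  let grouped := (PySem.Dict.ofList topics_data).items.foldl
    (fun (g : PySem.Dict Int (List String)) kv =>
      match od.get? kv.1 with
      | some ov =>
          -- `if ov not in grouped: grouped[ov] = []` then `grouped[ov].append(key)`
          (if g.contains ov then g else g.insert ov []).modify ov [] (fun l => l ++ [kv.1])
      | none => g)
    PySem.Dict.empty
  grouped.items.map (fun p => (p.1, PySem.List.sorted p.2 (gtboSortKey od.keys)))

-- ===== PORT B =====
def group_topics_by_order_alt (topics_data : List (String × String)) (order_data : List (String × Int)) : List (Int × List String) :=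
  let od := PySem.Dict.ofList order_data
  let td := PySem.Dict.ofList topics_data
  -- pass 1: create the empty groups in first-encounter order
  let grouped := td.items.foldl
    (fun (g : PySem.Dict Int (List String)) kv =>
      match od.get? kv.1 with
      | some ov => if g.contains ov then g else g.insert ov ([] : List String)
      | none => g)
    PySem.Dict.empty
  -- pass 2: fill the groups walking order_data in its own key order
  let filled := od.items.foldl
    (fun (g : PySem.Dict Int (List String)) kv =>
      if td.contains kv.1 then g.modify kv.2 [] (fun l => l ++ [kv.1]) else g)
    grouped
  filled.items

-- ===== PRECONDITION & SPEC =====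
def Spec_group_topics_by_order (topics_data : List (String × String)) (order_data : List (String × Int)) (out : List (Int × List String)) : Prop := out = group_topics_by_order_alt topics_data order_data
instance (topics_data : List (String × String)) (order_data : List (String × Int)) (out : List (Int × List String)) : Decidable (Spec_group_topics_by_order topics_data order_data out) := by unfold Spec_group_topics_by_order; infer_instance

-- ===== CLAIM (what is proved, stated in full; the proofs are below) =====
def Claim_equal_group_topics_by_order : Prop := ∀ (topics_data : List (String × String)) (order_data : List (String × Int)), Dom_group_topics_by_order topics_data order_data → Spec_group_topics_by_order topics_data order_data (group_topics_by_order topics_data order_data)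

-- ===== LEMMAS AND PROOFS =====

-- The contribution list: one pair (order_value, key) per topics entry whose key is in order_data.
def gtboP (td : PySem.Dict String String) (od : PySem.Dict String Int) : List (Int × String) :=
  td.items.filterMap (fun kv => (od.get? kv.1).map (fun ov => (ov, kv.1)))

-- The fill list of B's second pass: (order_value, key) per order_data entry whose key is a topic.
def gtboQ (td : PySem.Dict String String) (od : PySem.Dict String Int) : List (Int × String) :=
  (od.items.filter (fun kv => td.contains kv.1)).map (fun kv => (kv.2, kv.1))

-- A's step with the guard rewritten: insert-if-absent followed by modify is just modify.
theorem gtbo_stepA_eq (g : PySem.Dict Int (List String)) (ov : Int) (s : String) :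
    (if g.contains ov then g else g.insert ov []).modify ov [] (fun l => l ++ [s])
      = g.modify ov [] (fun l => l ++ [s]) := by
  by_cases h : g.contains ov = true
  · simp [h]
  · simp only [Bool.not_eq_true] at h
    simp [h, PySem.Dict.modify.eq_1, PySem.Dict.getD_insert_self,
      PySem.Dict.insert_insert_self, PySem.Dict.getD_of_not_contains g _ h]

-- B's pass-1 step is setdefault.
theorem gtbo_stepB_eq (g : PySem.Dict Int (List String)) (ov : Int) :
    (if g.contains ov then g else g.insert ov ([] : List String)) = g.setdefault ov [] := by
  by_cases h : g.contains ov = true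
  · simp [h, PySem.Dict.setdefault_of_contains g _ h]
  · simp only [Bool.not_eq_true] at h
    simp [h, PySem.Dict.setdefault_of_not_contains g _ h]

theorem gtbo_foldA_eq (td : PySem.Dict String String) (od : PySem.Dict String Int) :
    td.items.foldl
      (fun (g : PySem.Dict Int (List String)) kv =>
        match od.get? kv.1 with
        | some ov => (if g.contains ov then g else g.insert ov []).modify ov [] (fun l => l ++ [kv.1])
        | none => g) PySem.Dict.empty
    = (gtboP td od).foldl (fun d p => d.modify p.1 [] (fun l => l ++ [p.2])) PySem.Dict.empty := by
  rw [gtboP, List.foldl_filterMap]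
  congr 1
  funext g kv
  cases od.get? kv.1 with
  | none => simp
  | some ov => simp [gtbo_stepA_eq]

theorem gtbo_fold0_eq (td : PySem.Dict String String) (od : PySem.Dict String Int) :
    td.items.foldl
      (fun (g : PySem.Dict Int (List String)) kv =>
        match od.get? kv.1 with
        | some ov => if g.contains ov then g else g.insert ov ([] : List String)
        | none => g) PySem.Dict.empty
    = (gtboP td od).foldl (fun d p => d.setdefault p.1 []) PySem.Dict.empty := by
  rw [gtboP, List.foldl_filterMap]
  congr 1
  funext g kv
  cases od.get? kv.1 with
  | none => simp
  | some ov => simp [gtbo_stepB_eq]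

theorem gtbo_foldB_eq (td : PySem.Dict String String) (od : PySem.Dict String Int)
    (g0 : PySem.Dict Int (List String)) :
    od.items.foldl
      (fun (g : PySem.Dict Int (List String)) kv =>
        if td.contains kv.1 then g.modify kv.2 [] (fun l => l ++ [kv.1]) else g) g0
    = (gtboQ td od).foldl (fun d p => d.modify p.1 [] (fun l => l ++ [p.2])) g0 := by
  rw [gtboQ, List.foldl_map, List.foldl_filter]

theorem gtbo_setfold_getD (l : List (Int × String)) (d : PySem.Dict Int (List String)) (k : Int) :
    (l.foldl (fun d p => d.setdefault p.1 []) d).getD k [] = d.getD k [] := by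
  induction l generalizing d with
  | nil => rfl
  | cons p t ih =>
      rw [List.foldl_cons, ih]
      by_cases h : k = p.1
      · subst h; exact PySem.Dict.getD_setdefault_self d p.1 [] []
      · rw [PySem.Dict.getD_eq_get?_getD, PySem.Dict.get?_setdefault_of_ne d [] h,
          PySem.Dict.getD_eq_get?_getD]

theorem gtbo_setdefault_keys (d : PySem.Dict Int (List String)) (k : Int) :
    (d.setdefault k ([] : List String)).keys = PySem.Set.add d.keys k := by
  rw [PySem.Dict.keys_setdefault, PySem.Set.add, PySem.Set.contains]
  by_cases h : k ∈ d.keys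
  · simp [PySem.Dict.contains_eq_decide_mem_keys, h]
  · simp [PySem.Dict.contains_eq_decide_mem_keys, h]

theorem gtbo_setfold_keys (l : List (Int × String)) (d : PySem.Dict Int (List String)) :
    (l.foldl (fun d p => d.setdefault p.1 []) d).keys = PySem.Set.update d.keys (l.map (·.1)) := by
  induction l generalizing d with
  | nil => simp [PySem.Set.update]
  | cons p t ih =>
      rw [List.foldl_cons, ih, gtbo_setdefault_keys]
      simp [PySem.Set.update]

theorem gtbo_set_update_of_subset (s : PySem.Set Int) (xs : List Int) (h : ∀ x ∈ xs, x ∈ s) :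
    PySem.Set.update s xs = s := by
  induction xs generalizing s with
  | nil => simp [PySem.Set.update]
  | cons x t ih =>
      rw [PySem.Set.update, List.foldl_cons]
      have hx : PySem.Set.add s x = s := by
        rw [PySem.Set.add, PySem.Set.contains]
        simp [h x (by simp)]
      rw [hx]
      exact ih s (fun y hy => h y (by simp [hy]))

-- a guarded filterMap is a sublist of the full map
theorem gtbo_filterMap_guard_sublist {α β γ : Type} (g : α → β) (p : α → Option γ) (l : List α) :
    (l.filterMap (fun a => (p a).map (fun _ => g a))).Sublist (l.map g) := by
  induction l with
  | nil => simp
  | cons x t ih =>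
      cases h : p x with
      | none => simpa [h] using ih.cons (g x)
      | some c => simpa [h] using ih.cons₂ (g x)

-- on a duplicate-free list the sort key is the position, hence strictly increasing
theorem gtbo_pairwise_key (l : List String) (h : l.Nodup) :
    l.Pairwise (fun a b => gtboSortKey l a < gtboSortKey l b) := by
  rw [List.pairwise_iff_getElem]
  intro i j hi hj hij
  have hk : ∀ (m : Nat) (hm : m < l.length), gtboSortKey l l[m] = (m : Int) := by
    intro m hm
    have hidx : List.idxOf? l[m] l = some m := by
      rw [List.idxOf?_eq_some_iff]
      exact ⟨hm, rfl, fun j hj => by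
        intro he
        exact absurd ((List.Nodup.getElem_inj_iff h).mp he) (Nat.ne_of_lt hj)⟩
    simp [gtboSortKey, PySem.List.index?_eq_idxOf?, hidx]
  rw [hk i hi, hk j hj]
  exact_mod_cast hij

-- membership in group ov, on A's side …
theorem gtbo_memA (td : PySem.Dict String String) (od : PySem.Dict String Int) (ov : Int) (x : String) :
    x ∈ ((gtboP td od).filter (fun p => p.1 == ov)).map (fun p => p.2)
      ↔ (td.contains x = true ∧ od.get? x = some ov) := by
  simp only [gtboP, List.mem_map, List.mem_filter, List.mem_filterMap, Option.map_eq_some_iff,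
    beq_iff_eq]
  constructor
  · rintro ⟨p, ⟨⟨kv, hkv, w, hw, rfl⟩, hov⟩, rfl⟩
    dsimp at hov ⊢
    subst hov
    refine ⟨?_, hw⟩
    rw [PySem.Dict.contains_eq_decide_mem_keys]
    exact decide_eq_true (PySem.Dict.mem_keys_of_mem_items td hkv)
  · rintro ⟨hc, hg⟩
    rw [PySem.Dict.contains_eq_decide_mem_keys] at hc
    have hx : x ∈ td.keys := of_decide_eq_true hc
    rw [PySem.Dict.keys.eq_1] at hx
    obtain ⟨kv, hkv, rfl⟩ := List.mem_map.mp hx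
    exact ⟨(ov, kv.1), ⟨⟨kv, hkv, ov, hg, rfl⟩, rfl⟩, rfl⟩

-- … and on B's side: the same condition
theorem gtbo_memB (td : PySem.Dict String String) (od : PySem.Dict String Int)
    (hno : od.keys.Nodup) (ov : Int) (x : String) :
    x ∈ ((gtboQ td od).filter (fun p => p.1 == ov)).map (fun p => p.2)
      ↔ (td.contains x = true ∧ od.get? x = some ov) := by
  simp only [gtboQ, List.filter_map, Function.comp_def, List.mem_map, List.mem_filter,
    List.filter_filter, beq_iff_eq, Bool.and_eq_true]
  constructor
  · rintro ⟨p, ⟨kv, ⟨hkv, hov, hc⟩, rfl⟩, rfl⟩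
    subst hov
    exact ⟨hc, PySem.Dict.get?_of_mem_items od hkv hno⟩
  · rintro ⟨hc, hg⟩
    exact ⟨(ov, x), ⟨(x, ov), ⟨PySem.Dict.mem_items_of_get?_eq_some od hg, rfl, hc⟩, rfl⟩, rfl⟩

theorem gtbo_sublistB (td : PySem.Dict String String) (od : PySem.Dict String Int) (ov : Int) :
    (((gtboQ td od).filter (fun p => p.1 == ov)).map (fun p => p.2)).Sublist od.keys := by
  rw [gtboQ, List.filter_map, List.map_map, PySem.Dict.keys.eq_1]
  exact (List.filter_sublist.trans List.filter_sublist).map _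

theorem gtbo_sublistA (td : PySem.Dict String String) (od : PySem.Dict String Int) (ov : Int) :
    (((gtboP td od).filter (fun p => p.1 == ov)).map (fun p => p.2)).Sublist td.keys := by
  have h1 : (((gtboP td od).filter (fun p => p.1 == ov)).map (fun p => p.2)).Sublist
      ((gtboP td od).map (fun p => p.2)) := List.filter_sublist.map _
  have h2 : (gtboP td od).map (fun p => p.2)
      = td.items.filterMap (fun kv => (od.get? kv.1).map (fun _ => kv.1)) := by
    rw [gtboP, List.map_filterMap]
    simp [Option.map_map, Function.comp_def]
  rw [PySem.Dict.keys.eq_1]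
  exact h1.trans (h2 ▸ gtbo_filterMap_guard_sublist (fun kv => kv.1) (fun kv => od.get? kv.1) td.items)

-- the heart: A's sorted group equals B's fill order
theorem gtbo_core (td : PySem.Dict String String) (od : PySem.Dict String Int)
    (htn : td.keys.Nodup) (hno : od.keys.Nodup) (ov : Int) :
    PySem.List.sorted (((gtboP td od).filter (fun p => p.1 == ov)).map (fun p => p.2))
      (gtboSortKey od.keys)
    = ((gtboQ td od).filter (fun p => p.1 == ov)).map (fun p => p.2) := by
  apply PySem.List.sorted_eq_of_perm_of_pairwise_lt
  · rw [List.perm_ext_iff_of_nodup ((gtbo_sublistB td od ov).nodup hno)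
      ((gtbo_sublistA td od ov).nodup htn)]
    intro x
    rw [gtbo_memB td od hno ov x, gtbo_memA td od ov x]
  · exact List.Pairwise.sublist (gtbo_sublistB td od ov) (gtbo_pairwise_key od.keys hno)

-- every order value B's second pass touches already has its group created
theorem gtbo_Q_keys_sub_P_keys (td : PySem.Dict String String) (od : PySem.Dict String Int)
    (hno : od.keys.Nodup) :
    ∀ x ∈ (gtboQ td od).map (fun p => p.1), x ∈ (gtboP td od).map (fun p => p.1) := by
  intro x hx
  simp only [gtboQ, List.map_map, List.mem_map, List.mem_filter, Function.comp_def] at hx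
  obtain ⟨kv, ⟨hkv, hc⟩, rfl⟩ := hx
  have hg : od.get? kv.1 = some kv.2 := PySem.Dict.get?_of_mem_items od hkv hno
  rw [PySem.Dict.contains_eq_decide_mem_keys] at hc
  have hk : kv.1 ∈ td.keys := of_decide_eq_true hc
  rw [PySem.Dict.keys.eq_1] at hk
  obtain ⟨kv', hkv', hfst⟩ := List.mem_map.mp hk
  simp only [gtboP, List.mem_map, List.mem_filterMap, Option.map_eq_some_iff]
  exact ⟨(kv.2, kv'.1), ⟨kv', hkv', kv.2, by rw [hfst, hg], rfl⟩, rfl⟩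

-- ===== VERDICT (by name: the statement is the Claim_ definition above) =====
theorem group_topics_by_order_spec : Claim_equal_group_topics_by_order := by
  intro topics_data order_data _
  show group_topics_by_order topics_data order_data
    = group_topics_by_order_alt topics_data order_data
  rw [group_topics_by_order, group_topics_by_order_alt]
  set td := PySem.Dict.ofList topics_data with htd
  set od := PySem.Dict.ofList order_data with hod
  have htn : td.keys.Nodup := PySem.Dict.nodup_keys_ofList _
  have hno : od.keys.Nodup := PySem.Dict.nodup_keys_ofList _
  rw [gtbo_foldA_eq td od, gtbo_fold0_eq td od, gtbo_foldB_eq td od]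
  set A1 := (gtboP td od).foldl (fun d p => d.modify p.1 [] (fun l => l ++ [p.2])) PySem.Dict.empty with hA1
  set G0 := (gtboP td od).foldl (fun d p => d.setdefault p.1 []) PySem.Dict.empty with hG0
  set F := (gtboQ td od).foldl (fun d p => d.modify p.1 [] (fun l => l ++ [p.2])) G0 with hF
  have hkA : A1.keys = PySem.Set.update [] ((gtboP td od).map (fun p => p.1)) := by
    rw [hA1]
    have := PySem.Dict.keys_foldl_modify_key (gtboP td od) (fun p => p.1) ([] : List String)
      (fun _ p => (fun l => l ++ [p.2])) PySem.Dict.empty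
    simpa [PySem.Dict.keys_empty] using this
  have hnA : A1.keys.Nodup := by
    rw [hA1]
    exact PySem.Dict.nodup_keys_foldl_modify_key (gtboP td od) (fun p => p.1) []
      (fun _ p => (fun l => l ++ [p.2])) PySem.Dict.empty (by simp [PySem.Dict.keys_empty])
  have hk0 : G0.keys = PySem.Set.update [] ((gtboP td od).map (fun p => p.1)) := by
    rw [hG0, gtbo_setfold_keys, PySem.Dict.keys_empty]
  have hkF : F.keys = A1.keys := by
    rw [hF]
    have := PySem.Dict.keys_foldl_modify_key (gtboQ td od) (fun p => p.1) ([] : List String)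
      (fun _ p => (fun l => l ++ [p.2])) G0
    rw [this, hk0, ← hkA, gtbo_set_update_of_subset]
    intro x hx
    rw [hkA, PySem.Set.mem_update]
    exact Or.inr (gtbo_Q_keys_sub_P_keys td od hno x hx)
  have hnF : F.keys.Nodup := hkF ▸ hnA
  have hgA : ∀ c, A1.getD c [] = ((gtboP td od).filter (fun p => p.1 == c)).map (fun p => p.2) := by
    intro c
    rw [hA1, PySem.Dict.getD_foldl_modify_append, PySem.Dict.getD_empty]
    simp
  have hgF : ∀ c, F.getD c [] = ((gtboQ td od).filter (fun p => p.1 == c)).map (fun p => p.2) := by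
    intro c
    rw [hF, PySem.Dict.getD_foldl_modify_append, hG0, gtbo_setfold_getD, PySem.Dict.getD_empty]
    simp
  rw [PySem.Dict.items_eq_map_keys A1 hnA [], PySem.Dict.items_eq_map_keys F hnF [],
    List.map_map, hkF]
  apply List.map_congr_left
  intro k _
  simp only [Function.comp_apply]
  rw [hgA k, hgF k, gtbo_core td od htn hno k]
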